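-- pv_equiv track=rewrite | github.com/palvarez89/sway-config | waybar/scripts/ci-status.py | build_tooltip
-- ===== SOURCE A (Python) =====
-- PREFIXES = ("epbr-data-warehouse-pipeline", "epbr-data-frontend-pipeline", "epbr-addressing-pipeline", "epbr-register-api-pipeline")
--
-- def icon_for(status: str, activity: str) -> str:
--     if activity == "Building":
--         return "⏳"
--     if status == "Success":
--         return "✅"
--     if status in ("Failure", "Exception"):
--         return "❌"
--     return "⚪"
--
-- def build_tooltip(items) -> str:
--     if not items:
--         return "No matching projects"
--     lines = []
--     for prefix in PREFIXES:
--         group = [i for i in items if i["prefix"] == prefix]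
--         if not group:
--             continue
--         lines.append(prefix + ":")
--         for i in group:
--             step = i["step"] or i["name"]
--             lines.append(f"  {icon_for(i['status'], i['activity'])} {step} → {i['status']}")
--     return "\n".join(lines)
-- ===== SOURCE B (Python) =====
-- PREFIXES = ("epbr-data-warehouse-pipeline", "epbr-data-frontend-pipeline", "epbr-addressing-pipeline", "epbr-register-api-pipeline")
--
-- def icon_for(status: str, activity: str) -> str:
--     if activity == "Building":
--         return "⏳"
--     if status == "Success":
--         return "✅"
--     if status in ("Failure", "Exception"):
--         return "❌"
--     return "⚪"
--
-- def format_line(i) -> str: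
--     step = i["step"] or i["name"]
--     return f"  {icon_for(i['status'], i['activity'])} {step} → {i['status']}"
--
-- def build_tooltip(items) -> str:
--     if not items:
--         return "No matching projects"
--     # one grouping pass, then one ordered emit pass
--     groups = {}
--     for i in items:
--         k = i["prefix"]
--         groups[k] = groups.get(k, []) + [i]
--     lines = []
--     for prefix in PREFIXES:
--         group = groups.get(prefix, [])
--         if not group:
--             continue
--         lines.append(prefix + ":")
--         lines.extend(format_line(i) for i in group)
--     return "\n".join(lines)
-- ===== Notes on version B (the rewrite author's own statement) =====
-- stated objective: alternative
-- what changed: Replaced A's four full filtering scans of the item list (one list comprehension per prefix) by a single grouping pass building a dict keyed by prefix, followed by one ordered emit pass over PREFIXES.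
import Mathlib
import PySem

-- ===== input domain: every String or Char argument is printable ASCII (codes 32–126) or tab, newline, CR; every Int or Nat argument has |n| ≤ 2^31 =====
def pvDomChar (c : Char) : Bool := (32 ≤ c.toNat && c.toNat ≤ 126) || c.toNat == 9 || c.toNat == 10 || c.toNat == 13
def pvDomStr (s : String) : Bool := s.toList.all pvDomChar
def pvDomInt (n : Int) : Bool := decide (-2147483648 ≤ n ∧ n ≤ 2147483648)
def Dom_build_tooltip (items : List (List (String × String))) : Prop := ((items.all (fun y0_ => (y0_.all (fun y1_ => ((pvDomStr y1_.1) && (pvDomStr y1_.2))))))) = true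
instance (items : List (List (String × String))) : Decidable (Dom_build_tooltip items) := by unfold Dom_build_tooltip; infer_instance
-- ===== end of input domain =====

-- B replaces A's four full filtering scans of the item list (one per prefix) by a single
-- grouping pass into a dict keyed by prefix followed by an ordered emit pass (objective: alternative).

-- shared module-level constant and helpers (identical in both Python sources)
def PREFIXES : List String :=
  ["epbr-data-warehouse-pipeline", "epbr-data-frontend-pipeline",
   "epbr-addressing-pipeline", "epbr-register-api-pipeline"]

-- i["k"]: first-match lookup in the item's association list; total stand-in returns ""
-- where Python would raise KeyError (those inputs are excluded by Pre_build_tooltip)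
def itemGet (i : List (String × String)) (k : String) : String :=
  ((PySem.Dict.mk i).get? k).getD ""

def icon_for (status : String) (activity : String) : String :=
  if activity = "Building" then "⏳"
  else if status = "Success" then "✅"
  else if status = "Failure" ∨ status = "Exception" then "❌"
  else "⚪"

-- ===== PORT A =====
def build_tooltip (items : List (List (String × String))) : String :=
  if items = [] then "No matching projects"
  else
    let lines := PREFIXES.foldl (fun lines pfx =>
      let group := items.filter (fun i => itemGet i "prefix" == pfx)
      if group = [] then lines
      else
        group.foldl (fun ls i =>
          let step0 := itemGet i "step"
          let step := if step0 = "" then itemGet i "name" else step0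
          ls ++ ["  " ++ icon_for (itemGet i "status") (itemGet i "activity") ++ " " ++
                 step ++ " → " ++ itemGet i "status"])
          (lines ++ [pfx ++ ":"])) []
    PySem.Str.join "\n" lines

-- ===== PORT B =====
def format_line (i : List (String × String)) : String :=
  let step0 := itemGet i "step"
  let step := if step0 = "" then itemGet i "name" else step0
  "  " ++ icon_for (itemGet i "status") (itemGet i "activity") ++ " " ++
    step ++ " → " ++ itemGet i "status"

def build_tooltip_alt (items : List (List (String × String))) : String :=
  if items = [] then "No matching projects"
  else
    let groups := items.foldl
      (fun d i => d.modify (itemGet i "prefix") [] (· ++ [i]))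
      (PySem.Dict.empty : PySem.Dict String (List (List (String × String))))
    let lines := PREFIXES.foldl (fun ls pfx =>
      let group := groups.getD pfx []
      if group = [] then ls
      else ls ++ [pfx ++ ":"] ++ group.map format_line) []
    PySem.Str.join "\n" lines

-- ===== PRECONDITION & SPEC =====
-- Pre_ excludes exactly the inputs on which A raises KeyError: every item needs a "prefix"
-- key, and an item whose prefix is one of PREFIXES needs "step", "status", "activity",
-- and (when its "step" value is the empty string) "name".
def Pre_build_tooltip (items : List (List (String × String))) : Prop :=
  ∀ i ∈ items, "prefix" ∈ i.map Prod.fst ∧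
    (itemGet i "prefix" ∈ PREFIXES →
      "step" ∈ i.map Prod.fst ∧ "status" ∈ i.map Prod.fst ∧ "activity" ∈ i.map Prod.fst ∧
        (itemGet i "step" = "" → "name" ∈ i.map Prod.fst))

instance (items : List (List (String × String))) : Decidable (Pre_build_tooltip items) := by
  unfold Pre_build_tooltip; infer_instance

def pvWitness_build_tooltip : (List (List (String × String))) :=
  [[("prefix", "epbr-addressing-pipeline"), ("step", "build"),
    ("status", "Success"), ("activity", "Idle")],
   [("prefix", "other"), ("note", "ignored")]]

def Spec_build_tooltip (items : List (List (String × String))) (out : String) : Prop := out = build_tooltip_alt items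
instance (items : List (List (String × String))) (out : String) : Decidable (Spec_build_tooltip items out) := by unfold Spec_build_tooltip; infer_instance

-- ===== CLAIM (what is proved, stated in full; the proofs are below) =====
def Claim_equal_build_tooltip : Prop := ∀ (items : List (List (String × String))), Dom_build_tooltip items → Pre_build_tooltip items → Spec_build_tooltip items (build_tooltip items)

-- ===== LEMMAS AND PROOFS =====

-- B's grouping dict looked up at any key gives exactly A's filtered group
theorem groups_getD_eq (items : List (List (String × String))) (p : String) :
    ((items.foldl (fun d i => d.modify (itemGet i "prefix") [] (· ++ [i]))
        (PySem.Dict.empty : PySem.Dict String (List (List (String × String))))).getD p [])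
      = items.filter (fun i => itemGet i "prefix" == p) := by
  have h := PySem.Dict.getD_foldl_modify_append
    (l := items.map (fun i => (itemGet i "prefix", i)))
    (d := (PySem.Dict.empty : PySem.Dict String (List (List (String × String))))) (c := p)
  simpa [List.foldl_map, List.filter_map, Function.comp_def, List.map_map] using h

theorem build_tooltip_spec' (items : List (List (String × String))) :
    build_tooltip items = build_tooltip_alt items := by
  unfold build_tooltip build_tooltip_alt
  by_cases h : items = []
  · simp [h]
  · simp only [h]
    refine congrArg (PySem.Str.join "\n") (PySem.List.foldl_congr_mem _ _ _ _ ?_)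
    intro ls p _
    rw [groups_getD_eq]
    by_cases hg : items.filter (fun i => itemGet i "prefix" == p) = []
    · simp [hg]
    · simp only [hg, PySem.List.foldl_append_singleton_eq_map, List.append_assoc]
      have hf : format_line = fun x =>
          ("  " ++ icon_for (itemGet x "status") (itemGet x "activity") ++ " " ++
            if itemGet x "step" = "" then itemGet x "name" else itemGet x "step") ++
            " → " ++ itemGet x "status" := by
        funext x; simp [format_line]
      simp [hf]

-- ===== VERDICT (by name: the statement is the Claim_ definition above) =====
theorem build_tooltip_spec : Claim_equal_build_tooltip := by
  intro items _ _
  unfold Spec_build_tooltip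
  exact build_tooltip_spec' items
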